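-- pv_equiv track=rewrite | github.com/drodda/advent_of_code | aoc_2020/challenge_16.py | find_rules_order
-- ===== SOURCE A (Python) =====
-- class InvalidRuleOrder(Exception):
--     """ Raised when a rule combination is not valid """
--     pass
--
-- def find_rules_order(valid_rules_per_col, used_rules=None):
--     """ For a list of (list of rules valid per column), find a valid order of unique rules valid for each column """
--
--     if used_rules is None:
--         used_rules = []
--
--     i = len(used_rules)
--     if i >= len(valid_rules_per_col):
--         # All columns have been assigned a rule - success!
--         return []
--
--     for rule in valid_rules_per_col[i]:
--         try:
--             if rule not in used_rules:
--                 # Rule has not yet been used - check if the rest of the chain is valid with this rule in place i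
--                 return [rule] + find_rules_order(valid_rules_per_col, used_rules + [rule])
--         except InvalidRuleOrder:
--             # The rest of the chain was not valid - keep searching
--             pass
--     # A not valid combination has been reached
--     raise InvalidRuleOrder
-- ===== SOURCE B (Python) =====
-- class InvalidRuleOrder(Exception):
--     """ Raised when a rule combination is not valid """
--     pass
--
--
-- def find_rules_order(valid_rules_per_col, used_rules=None):
--     """ Iterative depth-first backtracking with an explicit stack of (rule, resume-cursor) pairs. """
--     used = [] if used_rules is None else used_rules
--     base = len(used)
--     n = len(valid_rules_per_col)
--     stack = []  # one (chosen rule, cursor to resume from) pair per assigned column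
--     cur = 0     # cursor into the current column's rule list
--     while base + len(stack) < n:
--         col = valid_rules_per_col[base + len(stack)]
--         if cur < len(col):
--             rule = col[cur]
--             if rule in used or any(rule == r for r, _ in stack):
--                 cur += 1
--             else:
--                 stack.append((rule, cur + 1))
--                 cur = 0
--         else:
--             if not stack:
--                 raise InvalidRuleOrder
--             _, cur = stack.pop()
--     return [r for r, _ in stack]
-- ===== Notes on version B (the rewrite author's own statement) =====
-- stated objective: alternative
-- what changed: The recursive backtracking with InvalidRuleOrder-exception control flow is replaced by an iterative depth-first loop over an explicit stack of (rule, resume-cursor) pairs, preserving the exact leftmost depth-first search order.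
import Mathlib
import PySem

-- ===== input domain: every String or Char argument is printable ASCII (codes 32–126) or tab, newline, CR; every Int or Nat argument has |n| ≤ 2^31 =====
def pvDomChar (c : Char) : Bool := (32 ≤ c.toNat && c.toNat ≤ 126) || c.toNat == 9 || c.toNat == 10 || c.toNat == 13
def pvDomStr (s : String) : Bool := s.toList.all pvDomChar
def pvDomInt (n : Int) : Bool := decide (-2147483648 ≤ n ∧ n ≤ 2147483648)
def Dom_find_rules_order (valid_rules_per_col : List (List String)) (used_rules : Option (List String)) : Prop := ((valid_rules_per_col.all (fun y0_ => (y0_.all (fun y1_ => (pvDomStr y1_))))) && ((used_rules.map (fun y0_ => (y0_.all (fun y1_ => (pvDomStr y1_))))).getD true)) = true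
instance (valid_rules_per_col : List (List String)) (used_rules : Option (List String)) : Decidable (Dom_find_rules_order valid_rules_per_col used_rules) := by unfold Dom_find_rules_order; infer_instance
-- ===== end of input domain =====

-- B replaces A's recursion-plus-exception control flow with an iterative depth-first loop over an
-- explicit stack of (rule, resume-cursor) pairs (objective: alternative decomposition, same search order).
-- Both ports encode "raise InvalidRuleOrder" as Option.none; Pre_ excludes exactly the raising inputs.

-- ===== PORT A =====
-- A's recursion: `goA used` is one call of find_rules_order with accumulated used_rules; the
-- `for rule in valid[i]` loop with its try/except is `tryA` over the remaining rules of the column.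
-- `none` marks `raise InvalidRuleOrder`; the guarded index valid_rules_per_col[i] (i < len by the
-- guard) is ported as getD.
-- small arithmetic facts cited from the termination proofs (kept as named lemmas so the
-- recursive definitions carry only tiny proof terms)
theorem pvSubLt (a b : Nat) (h : ¬ a ≤ b) : a - b < a + 1 - b := by omega

theorem pvSubLe (a : Nat) (used : List String) (r : String) :
    a + 1 - (used ++ [r]).length ≤ a - used.length := by
  rw [List.length_append, List.length_cons, List.length_nil]
  omega

mutual
def pvGoA (valid : List (List String)) (used : List String) : Option (List String) :=
  if h : valid.length ≤ used.length then
    some []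
  else
    pvTryA valid used (valid.getD used.length [])
  termination_by (valid.length + 1 - used.length, 0)
  decreasing_by exact Prod.Lex.left _ _ (pvSubLt valid.length used.length h)
def pvTryA (valid : List (List String)) (used : List String) : List String → Option (List String)
  | [] => none
  | r :: rs =>
    if r ∈ used then pvTryA valid used rs
    else
      match pvGoA valid (used ++ [r]) with
      | some rest => some (r :: rest)
      | none => pvTryA valid used rs
  termination_by rules => (valid.length - used.length, rules.length)
  decreasing_by
    · exact Prod.Lex.right _ (Nat.lt_succ_self _)
    · exact Prod.Lex.right' _ (pvSubLe valid.length used r) (Nat.succ_pos _)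
    · exact Prod.Lex.right _ (Nat.lt_succ_self _)
end

def find_rules_order (valid_rules_per_col : List (List String)) (used_rules : Option (List String)) : List String :=
  (pvGoA valid_rules_per_col (used_rules.getD [])).getD []

-- ===== PORT B =====
-- Source B's while loop is ported as structural recursion on a fuel counter (a pure totality guard:
-- the proofs below show the initial fuel 2*pvProdP+1 strictly dominates the loop's step count,
-- so the fuel-exhausted branch is never taken on any input).
def pvProdP (C : List (List String)) : Nat := C.foldr (fun col acc => (col.length + 1) * acc) 1

-- One loop step per fuel unit: guard `base + len(stack) < n`; cursor in range → skip a used/chosen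
-- rule (cur+1) or push (rule, cur+1); cursor exhausted → pop and resume (none = Source B's raise).
def pvLoopB (valid : List (List String)) (used : List String) :
    Nat → List (String × Nat) → Nat → Option (List String)
  | 0, _, _ => none
  | fuel + 1, stack, cur =>
    if used.length + stack.length < valid.length then
      if hc : cur < ((valid.drop used.length).getD stack.length []).length then
        if ((valid.drop used.length).getD stack.length [])[cur] ∈ used ∨
           ((valid.drop used.length).getD stack.length [])[cur] ∈ stack.map Prod.fst then
          pvLoopB valid used fuel stack (cur + 1)
        else
          pvLoopB valid used fuel ((((valid.drop used.length).getD stack.length [])[cur], cur + 1) :: stack) 0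
      else
        match stack with
        | [] => none
        | (_, c) :: st => pvLoopB valid used fuel st c
    else
      some ((stack.map Prod.fst).reverse)

def find_rules_order_alt (valid_rules_per_col : List (List String)) (used_rules : Option (List String)) : List String :=
  (pvLoopB valid_rules_per_col (used_rules.getD [])
    (2 * pvProdP (valid_rules_per_col.drop (used_rules.getD []).length) + 1) [] 0).getD []

-- ===== PRECONDITION & SPEC =====
-- Pre_ holds exactly when some choice of one rule per remaining column (a section of the dropped
-- list) is duplicate-free and disjoint from used_rules; on its complement Python A (and Python B)
-- raise InvalidRuleOrder, which both ports encode as none.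
def Pre_find_rules_order (valid_rules_per_col : List (List String)) (used_rules : Option (List String)) : Prop :=
  ∃ sel ∈ (valid_rules_per_col.drop (used_rules.getD []).length).sections,
    sel.Nodup ∧ ∀ r ∈ sel, r ∉ (used_rules.getD [])
instance (valid_rules_per_col : List (List String)) (used_rules : Option (List String)) : Decidable (Pre_find_rules_order valid_rules_per_col used_rules) := by unfold Pre_find_rules_order; infer_instance

def pvWitness_find_rules_order : List (List String) × Option (List String) :=
  ([["a", "b"], ["a"]], none)

def Spec_find_rules_order (valid_rules_per_col : List (List String)) (used_rules : Option (List String)) (out : List String) : Prop := out = find_rules_order_alt valid_rules_per_col used_rules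
instance (valid_rules_per_col : List (List String)) (used_rules : Option (List String)) (out : List String) : Decidable (Spec_find_rules_order valid_rules_per_col used_rules out) := by unfold Spec_find_rules_order; infer_instance

-- ===== CLAIM (what is proved, stated in full; the proofs are below) =====
def Claim_equal_find_rules_order : Prop := ∀ (valid_rules_per_col : List (List String)) (used_rules : Option (List String)), Dom_find_rules_order valid_rules_per_col used_rules → Pre_find_rules_order valid_rules_per_col used_rules → Spec_find_rules_order valid_rules_per_col used_rules (find_rules_order valid_rules_per_col used_rules)

-- ===== LEMMAS AND PROOFS =====

-- Loop measure: the cursor vector (bottom-to-top saved cursors, then the current cursor) read as a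
-- mixed-radix "remaining work" number, plus stack depth; it strictly dominates the remaining steps.
def pvW : List (List String) → List Nat → Nat
  | _, [] => 0
  | [], _ :: _ => 0
  | col :: C', c :: cs' => (col.length - min c col.length) * pvProdP C' + pvW C' cs'

def pvMeasure (C : List (List String)) (stack : List (String × Nat)) (cur : Nat) : Nat :=
  2 * pvW C ((stack.map Prod.snd).reverse ++ [cur]) + stack.length

theorem pvProdP_pos (C : List (List String)) : 0 < pvProdP C := by
  induction C with
  | nil => simp [pvProdP]
  | cons col C ih => simp only [pvProdP, List.foldr_cons] at *; positivity

theorem pvW_nil (cs : List Nat) : pvW [] cs = 0 := by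
  cases cs <;> simp [pvW]

theorem pvW_append (C : List (List String)) (xs ys : List Nat) :
    pvW C (xs ++ ys) = pvW C xs + pvW (C.drop xs.length) ys := by
  induction xs generalizing C with
  | nil => simp [pvW]
  | cons x xs ih =>
    cases C with
    | nil => simp [pvW, pvW_nil]
    | cons col C' => simp [pvW, ih, Nat.add_assoc]

theorem pvGetD_eq (C : List (List String)) (k : Nat) (hk : k < C.length) :
    C.getD k [] = C[k] := by
  simp [List.getD_eq_getElem?_getD, List.getElem?_eq_getElem hk]

theorem pvW_drop_single (C : List (List String)) (k x : Nat) (hk : k < C.length) :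
    pvW (C.drop k) [x] = ((C.getD k []).length - min x (C.getD k []).length) * pvProdP (C.drop (k + 1)) := by
  rw [List.drop_eq_getElem_cons hk, pvGetD_eq C k hk]
  simp [pvW]

theorem pvMeas_skip (C : List (List String)) (stack : List (String × Nat)) (cur : Nat)
    (hk : stack.length < C.length) (hc : cur < (C.getD stack.length []).length) :
    pvMeasure C stack (cur + 1) < pvMeasure C stack cur := by
  unfold pvMeasure
  rw [pvW_append, pvW_append, List.length_reverse, List.length_map,
      pvW_drop_single C _ _ hk, pvW_drop_single C _ _ hk]
  have hP := pvProdP_pos (C.drop (stack.length + 1))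
  set L := (C.getD stack.length []).length
  have : (L - min (cur + 1) L) * pvProdP (C.drop (stack.length + 1)) <
      (L - min cur L) * pvProdP (C.drop (stack.length + 1)) :=
    Nat.mul_lt_mul_of_lt_of_le (by omega) (le_refl _) hP
  omega

theorem pvMeas_push (C : List (List String)) (stack : List (String × Nat)) (cur : Nat) (r : String)
    (hk : stack.length < C.length) (hc : cur < (C.getD stack.length []).length) :
    pvMeasure C ((r, cur + 1) :: stack) 0 < pvMeasure C stack cur := by
  unfold pvMeasure
  simp only [List.map_cons, List.reverse_cons, List.append_assoc, List.cons_append, List.nil_append,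
    List.length_cons]
  rw [pvW_append, pvW_append, List.length_reverse, List.length_map]
  have h1 : pvW (C.drop stack.length) [cur + 1, 0] =
      ((C.getD stack.length []).length - min (cur + 1) (C.getD stack.length []).length) *
        pvProdP (C.drop (stack.length + 1)) + pvW (C.drop (stack.length + 1)) [0] := by
    rw [List.drop_eq_getElem_cons hk, pvGetD_eq C _ hk]
    simp [pvW]
  rw [h1, pvW_drop_single C _ _ hk]
  set L := (C.getD stack.length []).length
  cases hD' : C.drop (stack.length + 1) with
  | nil => simp [pvW_nil, pvProdP]; omega
  | cons col' C'' =>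
    have hQ := pvProdP_pos C''
    have hPP : pvProdP (col' :: C'') = (col'.length + 1) * pvProdP C'' := by simp [pvProdP]
    simp only [pvW, hPP]
    set Q := pvProdP C''
    set L' := col'.length
    have hm0 : min 0 L' = 0 := by omega
    rw [hm0]
    have h2 : (L - min (cur + 1) L) + 1 ≤ L - min cur L := by omega
    have h3 : (L - min (cur + 1) L) * ((L' + 1) * Q) + (L' - 0) * Q + Q ≤
        (L - min cur L) * ((L' + 1) * Q) := by
      calc (L - min (cur + 1) L) * ((L' + 1) * Q) + (L' - 0) * Q + Q
          = ((L - min (cur + 1) L) + 1) * ((L' + 1) * Q) := by simp only [Nat.sub_zero]; ring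
        _ ≤ (L - min cur L) * ((L' + 1) * Q) := Nat.mul_le_mul_right _ h2
    omega

theorem pvMeas_pop (C : List (List String)) (st : List (String × Nat)) (r0 : String) (c cur : Nat)
    (hk : st.length + 1 ≤ C.length)
    (hc : ¬ cur < (C.getD (st.length + 1) []).length) :
    pvMeasure C st c < pvMeasure C ((r0, c) :: st) cur := by
  unfold pvMeasure
  simp only [List.map_cons, List.reverse_cons, List.append_assoc, List.cons_append, List.nil_append,
    List.length_cons]
  rw [pvW_append, pvW_append, List.length_reverse, List.length_map]
  have h1 : pvW (C.drop st.length) [c, cur] = pvW (C.drop st.length) [c] := by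
    by_cases hkm : st.length < C.length
    · rw [List.drop_eq_getElem_cons hkm]
      simp only [pvW]
      cases hD' : C.drop (st.length + 1) with
      | nil => simp [pvW_nil]
      | cons col' C'' =>
        have hh : col' = C.getD (st.length + 1) [] := by
          have hlt : st.length + 1 < C.length := by
            have := List.length_drop (i := st.length + 1) (l := C)
            have : C.drop (st.length + 1) ≠ [] := by rw [hD']; simp
            rw [← List.length_pos_iff_ne_nil] at this
            omega
          rw [List.drop_eq_getElem_cons hlt] at hD'
          rw [pvGetD_eq C _ hlt]
          exact (List.cons.injEq _ _ _ _ ▸ hD').1.symm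
        simp only [pvW]
        have : min cur col'.length = col'.length := by rw [hh]; omega
        simp [this]
    · rw [List.drop_eq_nil_iff.mpr (by omega)]
      simp [pvW_nil]
  rw [h1]
  omega

-- chosen rules of a stack, bottom-to-top (Source B's `[r for r, _ in stack]` with top = Lean head)
def pvCh (stack : List (String × Nat)) : List String := (stack.map Prod.fst).reverse

-- A-side continuation: what A's suspended parent calls compute after the current subtree fails.
def pvUnwind (valid : List (List String)) (used : List String) :
    List (String × Nat) → Option (List String) → Option (List String)
  | st, some res => some (pvCh st ++ res)
  | [], none => none
  | (_, c) :: st, none =>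
      pvUnwind valid used st
        (pvTryA valid (used ++ pvCh st) (((valid.drop used.length).getD st.length []).drop c))

theorem pvCh_cons (r : String) (c : Nat) (st : List (String × Nat)) :
    pvCh ((r, c) :: st) = pvCh st ++ [r] := by simp [pvCh]

theorem pvGetD_drop (valid : List (List String)) (b j : Nat) :
    (valid.drop b).getD j [] = valid.getD (b + j) [] := by
  simp [List.getD_eq_getElem?_getD, List.getElem?_drop]

theorem pvGuardLt (valid : List (List String)) (used : List String) (k : Nat)
    (h : used.length + k < valid.length) : k < (valid.drop used.length).length := by
  rw [List.length_drop]; omega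

-- Main simulation lemma: with enough fuel, the loop from any state computes "search the current
-- subtree from cursor `cur`, then unwind through the suspended parents" — phrased with A's recursion.
theorem pvLoopB_eq (valid : List (List String)) (used : List String) :
    ∀ (fuel : Nat) (stack : List (String × Nat)) (cur : Nat),
    pvMeasure (valid.drop used.length) stack cur < fuel →
    pvLoopB valid used fuel stack cur =
      if used.length + stack.length < valid.length then
        pvUnwind valid used stack
          (pvTryA valid (used ++ pvCh stack) (((valid.drop used.length).getD stack.length []).drop cur))
      else some (pvCh stack) := by
  intro fuel
  induction fuel with
  | zero => intro stack cur h; omega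
  | succ fuel ih =>
    intro stack cur hfuel
    rw [pvLoopB]
    by_cases hg : used.length + stack.length < valid.length
    · rw [if_pos hg, if_pos hg]
      by_cases hc : cur < ((valid.drop used.length).getD stack.length []).length
      · rw [dif_pos hc]
        set r := ((valid.drop used.length).getD stack.length [])[cur] with hr
        by_cases hA : r ∈ used ∨ r ∈ stack.map Prod.fst
        · -- skip: col[cur] already used or chosen
          rw [if_pos hA]
          have hstep := ih stack (cur + 1)
            (by have := pvMeas_skip _ stack cur (pvGuardLt valid used _ hg) hc; omega)
          rw [if_pos hg] at hstep
          rw [hstep]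
          congr 1
          rw [List.drop_eq_getElem_cons hc, pvTryA]
          rw [if_pos (by simp only [List.mem_append, pvCh, List.mem_reverse]; exact hA)]
        · -- push: col[cur] fresh
          rw [if_neg hA]
          have hmem' : r ∉ used ++ pvCh stack := by
            simp only [List.mem_append, pvCh, List.mem_reverse]
            exact hA
          have hstep : pvTryA valid (used ++ pvCh stack)
              (((valid.drop used.length).getD stack.length []).drop cur) =
              match pvGoA valid (used ++ pvCh stack ++ [r]) with
              | some rest => some (r :: rest)
              | none => pvTryA valid (used ++ pvCh stack)
                  (((valid.drop used.length).getD stack.length []).drop (cur + 1)) := by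
            rw [List.drop_eq_getElem_cons hc, pvTryA, if_neg hmem']
          rw [hstep]
          have hih := ih ((r, cur + 1) :: stack) 0
            (by have := pvMeas_push _ stack cur r (pvGuardLt valid used _ hg) hc; omega)
          rw [hih]
          have hulen : (used ++ pvCh stack ++ [r]).length = used.length + stack.length + 1 := by
            simp only [List.length_append, pvCh, List.length_reverse, List.length_map,
              List.length_cons, List.length_nil]
          have hch : pvCh ((r, cur + 1) :: stack) = pvCh stack ++ [r] := pvCh_cons r (cur + 1) stack
          by_cases hg2 : used.length + stack.length + 1 < valid.length
          · have hgo : pvGoA valid (used ++ pvCh stack ++ [r]) =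
                pvTryA valid (used ++ pvCh stack ++ [r]) (valid.getD (used.length + stack.length + 1) []) := by
              rw [pvGoA, hulen, dif_neg (by omega)]
            have hguard : used.length + ((r, cur + 1) :: stack).length < valid.length := by
              simp only [List.length_cons]; omega
            rw [if_pos hguard]
            have hcol : (valid.drop used.length).getD (((r, cur + 1) :: stack).length) [] =
                valid.getD (used.length + stack.length + 1) [] := by
              rw [pvGetD_drop]; simp only [List.length_cons]; rw [← Nat.add_assoc]
            rw [hgo, hcol, List.drop_zero, hch, ← List.append_assoc]
            cases hT : pvTryA valid (used ++ pvCh stack ++ [r])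
                (valid.getD (used.length + stack.length + 1) []) with
            | some rest => simp [pvUnwind, hch, List.append_assoc]
            | none => simp [pvUnwind]
          · have hgo : pvGoA valid (used ++ pvCh stack ++ [r]) = some [] := by
              rw [pvGoA, hulen, dif_pos (by omega)]
            have hguard : ¬ used.length + ((r, cur + 1) :: stack).length < valid.length := by
              simp only [List.length_cons]; omega
            rw [if_neg hguard, hgo]
            simp [pvUnwind, hch]
      · rw [dif_neg hc]
        rw [List.drop_eq_nil_iff.mpr (Nat.le_of_not_lt hc), pvTryA]
        cases stack with
        | nil => rw [pvUnwind]
        | cons p st =>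
          obtain ⟨r0, c⟩ := p
          have hih := ih st c
            (by
              have := pvMeas_pop (valid.drop used.length) st r0 c cur
                (Nat.le_of_lt (pvGuardLt valid used _ hg)) hc
              omega)
          rw [if_pos (by simp only [List.length_cons] at hg; omega)] at hih
          show pvLoopB valid used fuel st c = pvUnwind valid used ((r0, c) :: st) none
          rw [hih, pvUnwind]
    · rw [if_neg hg, if_neg hg]
      rfl

theorem pvUnwind_nil (valid : List (List String)) (used : List String) (o : Option (List String)) :
    pvUnwind valid used [] o = o := by
  cases o <;> simp [pvUnwind, pvCh]

theorem pvW_single_le (C : List (List String)) : pvW C [0] ≤ pvProdP C := by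
  cases C with
  | nil => simp [pvW_nil]
  | cons col C' =>
    simp only [pvW, pvProdP, List.foldr_cons]
    have : (col.length - min 0 col.length) ≤ col.length := by omega
    calc (col.length - min 0 col.length) * pvProdP C' + 0
        ≤ col.length * pvProdP C' := by
          have := Nat.mul_le_mul_right (pvProdP C') this
          omega
      _ ≤ (col.length + 1) * pvProdP C' := Nat.mul_le_mul_right _ (by omega)

-- The two ports agree on every input (both encode A's exception as none).
theorem ports_eq (valid : List (List String)) (used? : Option (List String)) :
    find_rules_order valid used? = find_rules_order_alt valid used? := by
  unfold find_rules_order find_rules_order_alt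
  congr 1
  rw [pvLoopB_eq valid (used?.getD []) _ [] 0
    (by
      have := pvW_single_le (valid.drop (used?.getD []).length)
      simp only [pvMeasure, List.map_nil, List.reverse_nil, List.nil_append, List.length_nil]
      omega)]
  rw [pvGoA]
  by_cases hg : (used?.getD []).length + ([] : List (String × Nat)).length < valid.length
  · rw [if_pos hg, dif_neg (by simp only [List.length_nil] at hg ⊢; omega), pvUnwind_nil]
    rw [pvGetD_drop, List.drop_zero]
    simp [pvCh]
  · rw [if_neg hg, dif_pos (by simp at hg ⊢; omega)]
    simp [pvCh]

-- ===== VERDICT (by name: the statement is the Claim_ definition above) =====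
theorem find_rules_order_spec : Claim_equal_find_rules_order := by
  intro valid used? _ _
  unfold Spec_find_rules_order
  exact ports_eq valid used?
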